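-- pv_equiv track=rewrite | github.com/SherifMounir/Hr-Candidate-System | website/views.py | createBagOfWord
-- ===== SOURCE A (Python) =====
-- def createBagOfWord(userResumeData , jobRequiredSkills):
--     bagOfWord = []
--     for skill in userResumeData['skills']:
--         skills = skill.split(' ')
--         for item in skills:
--             bagOfWord.append(item)
--     # uniqueWords = set(bagOfWord).union(set(bagOfWordsB))
--     uniqueWords = set(bagOfWord)
--     numOfBOW = dict.fromkeys(uniqueWords, 0)
--     for jobskill in jobRequiredSkills:
--         if jobskill in numOfBOW.keys():
--             numOfBOW[jobskill] += 1
--     return numOfBOW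
-- ===== SOURCE B (Python) =====
-- def createBagOfWord(userResumeData, jobRequiredSkills):
--     # Table-free alternative: gather the distinct resume words, then map each
--     # word to the number of times it occurs in jobRequiredSkills via list.count
--     # (a direct scan), instead of A's zero-initialised dict incremented while
--     # iterating the job skills.
--     words = set(w for skill in userResumeData['skills'] for w in skill.split(' '))
--     return {w: jobRequiredSkills.count(w) for w in words}
-- ===== Notes on version B (the rewrite author's own statement) =====
-- stated objective: simpler
-- what changed: B drops A's zero-initialised dict and its increment loop over jobRequiredSkills entirely: it maps each distinct resume word to jobRequiredSkills.count(word), a direct scan of the job-skill list per word, with no counting table maintained at all.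
import Mathlib
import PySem

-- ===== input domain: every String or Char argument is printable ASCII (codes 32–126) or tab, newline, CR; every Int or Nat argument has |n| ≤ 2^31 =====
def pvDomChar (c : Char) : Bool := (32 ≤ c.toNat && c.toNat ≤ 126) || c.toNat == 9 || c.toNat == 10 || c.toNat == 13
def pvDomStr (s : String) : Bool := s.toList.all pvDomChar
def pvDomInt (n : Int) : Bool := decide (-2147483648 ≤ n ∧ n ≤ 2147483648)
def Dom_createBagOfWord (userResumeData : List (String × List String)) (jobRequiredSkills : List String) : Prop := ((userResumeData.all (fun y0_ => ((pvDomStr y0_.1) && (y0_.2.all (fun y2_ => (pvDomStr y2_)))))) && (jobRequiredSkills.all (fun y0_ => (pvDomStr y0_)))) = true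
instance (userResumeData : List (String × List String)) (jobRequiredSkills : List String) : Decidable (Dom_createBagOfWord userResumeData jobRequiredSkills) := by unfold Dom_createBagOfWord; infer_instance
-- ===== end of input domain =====

-- B drops A's counting table: it maps each distinct resume word to jobRequiredSkills.count(word),
-- a direct scan per word (simpler; return-value equivalence only; the dict output is represented
-- in first-insertion / set-iteration order).

-- ===== PORT A =====
-- skill.split(' '): split? with the nonempty literal separator never returns none
def pvSplitSp (s : String) : List String := (PySem.Str.split? s " ").getD []

def createBagOfWord (userResumeData : List (String × List String)) (jobRequiredSkills : List String) : List (String × Int) :=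
  match (PySem.Dict.mk userResumeData).get? "skills" with
  | none => []   -- Python raises KeyError here; excluded by Pre_
  | some skills =>
    -- bagOfWord = []; for skill in …: for item in skill.split(' '): bagOfWord.append(item)
    let bagOfWord : List String :=
      skills.foldl (fun acc skill =>
        (pvSplitSp skill).foldl (fun acc2 item => acc2 ++ [item]) acc) []
    -- uniqueWords = set(bagOfWord)
    let uniqueWords : PySem.Set String := PySem.Set.ofList bagOfWord
    -- numOfBOW = dict.fromkeys(uniqueWords, 0)
    let numOfBOW : PySem.Dict String Int :=
      uniqueWords.foldl (fun d w => d.insert w 0) PySem.Dict.empty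
    -- for jobskill in …: if jobskill in numOfBOW: numOfBOW[jobskill] += 1
    let numOfBOW :=
      jobRequiredSkills.foldl (fun d j =>
        if d.contains j then d.modify j 0 (fun v => v + 1) else d) numOfBOW
    numOfBOW.items

-- ===== PORT B =====
def createBagOfWord_alt (userResumeData : List (String × List String)) (jobRequiredSkills : List String) : List (String × Int) :=
  match (PySem.Dict.mk userResumeData).get? "skills" with
  | none => []   -- Python raises KeyError here; excluded by Pre_
  | some skills =>
    -- words = set(w for skill in … for w in skill.split(' '))
    let words : PySem.Set String := PySem.Set.ofList (skills.flatMap pvSplitSp)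
    -- {w: jobRequiredSkills.count(w) for w in words}
    words.map (fun w => (w, (PySem.List.count jobRequiredSkills w : Int)))

-- ===== PRECONDITION & SPEC =====
-- Pre_ excludes exactly the inputs where the Python A raises KeyError ('skills' absent).
def Pre_createBagOfWord (userResumeData : List (String × List String)) (jobRequiredSkills : List String) : Prop :=
  "skills" ∈ userResumeData.map Prod.fst
instance (userResumeData : List (String × List String)) (jobRequiredSkills : List String) : Decidable (Pre_createBagOfWord userResumeData jobRequiredSkills) := by unfold Pre_createBagOfWord; infer_instance
def pvWitness_createBagOfWord : (List (String × List String)) × List String :=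
  ([("skills", ["a b", "c"])], ["a", "a", "c", "d"])
def Spec_createBagOfWord (userResumeData : List (String × List String)) (jobRequiredSkills : List String) (out : List (String × Int)) : Prop := out = createBagOfWord_alt userResumeData jobRequiredSkills
instance (userResumeData : List (String × List String)) (jobRequiredSkills : List String) (out : List (String × Int)) : Decidable (Spec_createBagOfWord userResumeData jobRequiredSkills out) := by unfold Spec_createBagOfWord; infer_instance

-- ===== CLAIM (what is proved, stated in full; the proofs are below) =====
def Claim_equal_createBagOfWord : Prop := ∀ (userResumeData : List (String × List String)) (jobRequiredSkills : List String), Dom_createBagOfWord userResumeData jobRequiredSkills → Pre_createBagOfWord userResumeData jobRequiredSkills → Spec_createBagOfWord userResumeData jobRequiredSkills (createBagOfWord userResumeData jobRequiredSkills)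

-- ===== LEMMAS AND PROOFS =====

-- A's nested append loop collects exactly the flattened split lists.
lemma bag_eq_flatMap (skills : List String) :
    skills.foldl (fun acc skill =>
        (pvSplitSp skill).foldl (fun acc2 item => acc2 ++ [item]) acc) []
      = skills.flatMap pvSplitSp := by
  have h : ∀ l, skills.foldl (fun acc skill =>
      (pvSplitSp skill).foldl (fun acc2 item => acc2 ++ [item]) acc) l
        = l ++ skills.flatMap pvSplitSp := by
    induction skills with
    | nil => simp
    | cons sk rest ih =>
      intro l
      rw [List.foldl_cons, PySem.List.foldl_append_singleton_eq_self, ih]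
      simp
  simpa using h []

-- dict.fromkeys over a list of distinct keys, as a dict literal
lemma fromkeys_eq (ws : List String) (hnd : ws.Nodup) :
    ws.foldl (fun d w => d.insert w 0) (PySem.Dict.empty : PySem.Dict String Int)
      = PySem.Dict.mk (ws.map (fun w => (w, (0 : Int)))) := by
  apply PySem.Dict.ext
  have h := PySem.Dict.items_foldl_insert_fresh (l := ws) (k := fun w => w)
    (v := fun _ => (0:Int)) (d := PySem.Dict.empty)
    (by intro a _; rfl) (by simpa using hnd)
  simpa using h

lemma getD_mk_zero (ws : List String) (k : String) :
    (PySem.Dict.mk (ws.map (fun w => (w, (0 : Int))))).getD k 0 = 0 := by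
  induction ws with
  | nil => rfl
  | cons w rest ih =>
    simp only [List.map_cons, PySem.Dict.getD, PySem.Dict.get?_mk_cons]
    split <;> simp_all [PySem.Dict.getD]

-- one guarded step of A's increment loop never changes the key list
lemma step_keys (d : PySem.Dict String Int) (j : String) :
    (if d.contains j then d.modify j 0 (fun v => v + 1) else d).keys = d.keys := by
  split
  · rename_i h
    have h2 := PySem.Dict.keys_foldl_modify (l := [j]) (d0 := (0:Int))
      (f := fun _ _ v => v + 1) (d := d)
    simp only [List.foldl_cons, List.foldl_nil, PySem.Set.update_cons, PySem.Set.update_nil] at h2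
    rw [h2, PySem.Set.add_of_mem]
    rw [PySem.Dict.contains_eq_decide_mem_keys] at h
    simpa using h
  · rfl

-- A's guarded increment loop: keys fixed, count of the key added on present keys
lemma guarded_loop (js : List String) (d : PySem.Dict String Int) (k : String) :
    ((js.foldl (fun d j => if d.contains j then d.modify j 0 (fun v => v + 1) else d) d).getD k 0
        = d.getD k 0 + (if k ∈ d.keys then (js.count k : Int) else 0))
      ∧ (js.foldl (fun d j => if d.contains j then d.modify j 0 (fun v => v + 1) else d) d).keys = d.keys := by
  induction js generalizing d with
  | nil => simp
  | cons j rest ih =>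
    simp only [List.foldl_cons]
    obtain ⟨ihv, ihk⟩ := ih (if d.contains j then d.modify j 0 (fun v => v + 1) else d)
    constructor
    · rw [ihv, step_keys]
      by_cases hkj : k = j
      · subst hkj
        by_cases hm : k ∈ d.keys
        · have hc : d.contains k = true := by
            rw [PySem.Dict.contains_eq_decide_mem_keys]; simpa using hm
          simp [hc, hm, PySem.Dict.getD_modify_self]
          ring
        · have hc : d.contains k = false := by
            rw [PySem.Dict.contains_eq_decide_mem_keys]; simpa using hm
          simp [hc, hm]
      · have hcount : (j :: rest).count k = rest.count k := by
          simp [Ne.symm hkj]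
        rw [hcount]
        split
        · rw [PySem.Dict.getD_modify_of_ne _ _ _ hkj]
        · rfl
    · rw [ihk, step_keys]

-- ===== VERDICT (by name: the statement is the Claim_ definition above) =====
theorem createBagOfWord_spec : Claim_equal_createBagOfWord := by
  intro u js _hdom hpre
  unfold Spec_createBagOfWord
  cases hg : (PySem.Dict.mk u).get? "skills" with
  | none =>
    exfalso
    rw [PySem.Dict.get?_eq_none_iff_not_mem_keys] at hg
    unfold Pre_createBagOfWord at hpre
    exact hg (by simpa [PySem.Dict.keys] using hpre)
  | some skills =>
    simp only [createBagOfWord, createBagOfWord_alt, hg, bag_eq_flatMap]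
    set ws := PySem.Set.ofList (skills.flatMap pvSplitSp) with hws
    have hnd : ws.Nodup := PySem.Set.nodup_ofList _
    -- A side
    rw [fromkeys_eq ws hnd]
    set d0 := PySem.Dict.mk (ws.map (fun w => (w, (0 : Int)))) with hd0
    have hkeys0 : d0.keys = ws := by
      simp [hd0, PySem.Dict.keys, Function.comp_def]
    set F := js.foldl (fun d j => if d.contains j then d.modify j 0 (fun v => v + 1) else d) d0 with hF
    have hFkeys : F.keys = ws := by rw [hF, (guarded_loop js d0 "").2, hkeys0]
    have hFnd : F.keys.Nodup := by rw [hFkeys]; exact hnd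
    rw [PySem.Dict.items_eq_map_keys F hFnd 0, hFkeys]
    -- B side: each key's value is js.count k
    apply List.map_congr_left
    intro k hk
    have hv := (guarded_loop js d0 k).1
    rw [hkeys0] at hv
    rw [hv, getD_mk_zero, if_pos hk, PySem.List.count_eq]
    ring_nf
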